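-- pv_equiv track=rewrite | github.com/augmdc/wiki2confluence | wiki2confluence/wiki_converter.py | remove_structural_duplicates
-- ===== SOURCE A (Python) =====
-- from collections import defaultdict
--
-- def remove_structural_duplicates(content):
--     sections = defaultdict(list)
--     current_section = []
--     current_heading = None
--
--     for item in content:
--         if item.startswith('#'):  # It's a heading
--             if current_heading:
--                 sections[current_heading].append(''.join(current_section))
--             current_heading = item.strip()
--             current_section = [item]
--         else:
--             current_section.append(item)
--
--     # Add the last section
--     if current_heading:
--         sections[current_heading].append(''.join(current_section))
--
--     # Keep only unique sections for each heading
--     deduplicated_content = []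
--     for heading, section_contents in sections.items():
--         unique_sections = list(dict.fromkeys(section_contents))  # Remove duplicates while preserving order
--         deduplicated_content.extend(unique_sections)
--
--     return deduplicated_content
-- ===== SOURCE B (Python) =====
-- def remove_structural_duplicates(content):
--     # Phase 1: parse into a flat list of (stripped heading, joined section text) pairs,
--     # discarding anything before the first heading.
--     pairs = []
--     key = None
--     buf = []
--     for item in content:
--         if item.startswith('#'):
--             if key is not None:
--                 pairs.append((key, ''.join(buf)))
--             key = item.strip()
--             buf = []
--         buf.append(item)
--     if key is not None:
--         pairs.append((key, ''.join(buf)))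
--     # Phase 2: for each distinct heading in first-appearance order, emit its
--     # distinct section texts in order (nested filter instead of a dict of lists).
--     out = []
--     for k in dict.fromkeys(k for k, _ in pairs):
--         out.extend(dict.fromkeys(t for k2, t in pairs if k2 == k))
--     return out
-- ===== Notes on version B (the rewrite author's own statement) =====
-- stated objective: alternative
-- what changed: B replaces A's inline defaultdict grouping with a two-phase design: a parse pass producing a flat list of (heading, section-text) pairs, then per distinct heading a filter over that flat list with dict.fromkeys dedup, so no dict of lists is ever built.
import Mathlib
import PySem

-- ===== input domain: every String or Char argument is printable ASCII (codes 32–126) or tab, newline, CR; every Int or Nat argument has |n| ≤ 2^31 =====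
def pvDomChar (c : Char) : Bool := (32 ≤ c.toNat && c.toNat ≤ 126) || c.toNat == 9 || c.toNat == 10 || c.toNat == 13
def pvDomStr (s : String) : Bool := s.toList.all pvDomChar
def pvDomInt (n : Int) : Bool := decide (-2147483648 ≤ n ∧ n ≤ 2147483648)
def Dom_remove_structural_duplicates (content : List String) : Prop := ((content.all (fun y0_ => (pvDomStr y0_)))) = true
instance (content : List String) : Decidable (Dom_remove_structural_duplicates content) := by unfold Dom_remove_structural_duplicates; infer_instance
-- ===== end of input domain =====

-- B replaces A's inline defaultdict grouping by a parse pass to flat (heading, text) pairs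
-- plus a per-heading filter with ordered dedup; an alternative of similar cost, not claimed faster.

-- ===== PORT A =====
-- loop state: (sections : dict heading -> list of section texts, current_section, current_heading)
def remove_structural_duplicates (content : List String) : List String :=
  let st := content.foldl
    (fun (st : PySem.Dict String (List String) × List String × Option String) item =>
      let (sections, cur, heading) := st
      if PySem.Str.startswith item "#" then
        let sections' := match heading with
          | some h => sections.modify h [] (· ++ [PySem.Str.join "" cur])
          | none => sections
        (sections', [item], some (PySem.Str.strip item))
      else (sections, cur ++ [item], heading))
    (PySem.Dict.empty, [], none)
  let sections := match st.2.2 with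
    | some h => st.1.modify h [] (· ++ [PySem.Str.join "" st.2.1])
    | none => st.1
  -- for heading, section_contents in sections.items(): extend(list(dict.fromkeys(...)))
  sections.items.foldl (fun acc p => acc ++ PySem.List.dedup p.2) []

-- ===== PORT B =====
-- phase 1 state: (pairs, key, buf); phase 2: nested filter per distinct key
def remove_structural_duplicates_alt (content : List String) : List String :=
  let st := content.foldl
    (fun (st : List (String × String) × Option String × List String) item =>
      let (ps, key, buf) := st
      if PySem.Str.startswith item "#" then
        let ps' := match key with
          | some k => ps ++ [(k, PySem.Str.join "" buf)]
          | none => ps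
        (ps', some (PySem.Str.strip item), [item])   -- buf = [] then buf.append(item)
      else (ps, key, buf ++ [item]))
    ([], none, [])
  let pairs := match st.2.1 with
    | some k => st.1 ++ [(k, PySem.Str.join "" st.2.2)]
    | none => st.1
  (PySem.List.dedup (pairs.map (·.1))).foldl
    (fun acc k => acc ++ PySem.List.dedup ((pairs.filter (fun p => p.1 == k)).map (·.2))) []

-- ===== PRECONDITION & SPEC =====
def Spec_remove_structural_duplicates (content : List String) (out : List String) : Prop := out = remove_structural_duplicates_alt content
instance (content : List String) (out : List String) : Decidable (Spec_remove_structural_duplicates content out) := by unfold Spec_remove_structural_duplicates; infer_instance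

-- ===== CLAIM (what is proved, stated in full; the proofs are below) =====
def Claim_equal_remove_structural_duplicates : Prop := ∀ (content : List String), Dom_remove_structural_duplicates content → Spec_remove_structural_duplicates content (remove_structural_duplicates content)

-- ===== LEMMAS AND PROOFS =====

-- the dict A maintains, expressed as a fold over B's flat pair list
def pvDictOf (d : PySem.Dict String (List String)) (ps : List (String × String)) :
    PySem.Dict String (List String) :=
  ps.foldl (fun d p => d.modify p.1 [] (· ++ [p.2])) d

theorem pvDictOf_append (d : PySem.Dict String (List String)) (ps : List (String × String))
    (p : String × String) : pvDictOf d (ps ++ [p]) = (pvDictOf d ps).modify p.1 [] (· ++ [p.2]) := by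
  simp [pvDictOf]

-- A's parse loop, started on the dict built from B's pairs, tracks B's parse loop
theorem pv_loop_rel (content : List String) (d : PySem.Dict String (List String))
    (ps : List (String × String)) (cur : List String) (key : Option String) :
    content.foldl
      (fun (st : PySem.Dict String (List String) × List String × Option String) item =>
        let (sections, cur, heading) := st
        if PySem.Str.startswith item "#" then
          let sections' := match heading with
            | some h => sections.modify h [] (· ++ [PySem.Str.join "" cur])
            | none => sections
          (sections', [item], some (PySem.Str.strip item))
        else (sections, cur ++ [item], heading))
      (pvDictOf d ps, cur, key)
    = (let st := content.foldl
        (fun (st : List (String × String) × Option String × List String) item =>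
          let (ps, key, buf) := st
          if PySem.Str.startswith item "#" then
            let ps' := match key with
              | some k => ps ++ [(k, PySem.Str.join "" buf)]
              | none => ps
            (ps', some (PySem.Str.strip item), [item])
          else (ps, key, buf ++ [item]))
        (ps, key, cur)
       (pvDictOf d st.1, st.2.2, st.2.1)) := by
  induction content generalizing ps cur key with
  | nil => simp
  | cons item rest ih =>
    simp only [List.foldl_cons]
    by_cases h : PySem.Str.startswith item "#" = true
    · simp only [h, if_pos]
      cases key with
      | none => exact ih ps [item] (some (PySem.Str.strip item))
      | some k =>
        have := ih (ps ++ [(k, PySem.Str.join "" cur)]) [item] (some (PySem.Str.strip item))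
        rw [pvDictOf_append] at this
        exact this
    · simp only [h, if_neg, Bool.false_eq_true, not_false_iff]
      exact ih ps (cur ++ [item]) key

-- the grouped dict read out per distinct key of the flat pair list
theorem pv_dict_items (ps : List (String × String)) :
    (pvDictOf PySem.Dict.empty ps).items
      = (PySem.List.dedup (ps.map (·.1))).map
          (fun k => (k, (ps.filter (fun p => p.1 == k)).map (·.2))) := by
  have hnd : (pvDictOf PySem.Dict.empty ps).keys.Nodup := by
    apply PySem.Dict.nodup_keys_foldl_modify_key (key := Prod.fst)
      (f := fun _ p => (· ++ [p.2]))
    simp [PySem.Dict.keys_empty]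
  have hkeys : (pvDictOf PySem.Dict.empty ps).keys = PySem.List.dedup (ps.map (·.1)) := by
    rw [pvDictOf, PySem.Dict.keys_foldl_modify_key]
    simp [PySem.Dict.keys_empty, PySem.Set.update_nil_left]
  rw [PySem.Dict.items_eq_map_keys _ hnd [], hkeys]
  apply List.map_congr_left
  intro k _
  rw [pvDictOf, PySem.Dict.getD_foldl_modify_append]
  simp [PySem.Dict.getD_empty]

-- ===== VERDICT (by name: the statement is the Claim_ definition above) =====
theorem remove_structural_duplicates_spec : Claim_equal_remove_structural_duplicates := by
  intro content _
  unfold Spec_remove_structural_duplicates remove_structural_duplicates remove_structural_duplicates_alt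
  have h := pv_loop_rel content PySem.Dict.empty [] [] none
  simp only [pvDictOf, List.foldl_nil] at h
  rw [h]
  set st := content.foldl
    (fun (st : List (String × String) × Option String × List String) item =>
      let (ps, key, buf) := st
      if PySem.Str.startswith item "#" then
        let ps' := match key with
          | some k => ps ++ [(k, PySem.Str.join "" buf)]
          | none => ps
        (ps', some (PySem.Str.strip item), [item])
      else (ps, key, buf ++ [item]))
    (([], none, []) : List (String × String) × Option String × List String) with hst
  -- fold the final flush into the pair list on both sides
  cases hkey : st.2.1 with
  | none =>
    simp only [hkey]
    rw [show List.foldl (fun d p => d.modify p.1 [] fun x => x ++ [p.2]) PySem.Dict.empty st.1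
          = pvDictOf PySem.Dict.empty st.1 from rfl, pv_dict_items, List.foldl_map]
  | some k =>
    simp only [hkey]
    rw [show ((List.foldl (fun d p => d.modify p.1 [] fun x => x ++ [p.2]) PySem.Dict.empty st.1).modify
            k [] fun x => x ++ [PySem.Str.join "" st.2.2])
          = pvDictOf PySem.Dict.empty (st.1 ++ [(k, PySem.Str.join "" st.2.2)])
        from by simp [pvDictOf], pv_dict_items, List.foldl_map]
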